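-- pv_equiv track=rewrite | github.com/Fabianstw/Puzzles | AOC/Y25/d2.py | invalid_ids_2
-- ===== SOURCE A (Python) =====
-- def invalid_ids_2(start, end):
--   # Now invalid if a repeated pattern
--   ids = []
--
--   for i in range(start, end + 1):
--     str_i = str(i)
--     for step_size in range(1, len(str_i) // 2 + 1):
--       pattern = str_i[:step_size]
--       pattern_match = True
--       # check if the pattern reoccurs at every stepsize
--       for j in range(step_size, len(str_i), step_size):
--         if str_i[j:j+step_size] != pattern:
--           pattern_match = False
--           break
--       if pattern_match:
--         ids.append(i)
--         break
--
--   return ids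
-- ===== SOURCE B (Python) =====
-- def invalid_ids_2(start, end):
--   # Instead of scanning every integer in [start, end] and testing its decimal
--   # string for a repeated block, enumerate the repeated-block numbers directly:
--   # for every total length L and every proper divisor d of L, every d-digit
--   # block b yields the periodic number b * (10**L - 1) // (10**d - 1).
--   lo = 11 if start < 11 else start
--   if end < lo:
--     return []
--   max_len = len(str(end))
--   seen = set()
--   for length in range(2, max_len + 1):
--     for d in range(1, length // 2 + 1):
--       if length % d != 0:
--         continue
--       mult = (10 ** length - 1) // (10 ** d - 1)
--       for block in range(10 ** (d - 1), 10 ** d):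
--         n = block * mult
--         if lo <= n <= end:
--           seen.add(n)
--   return sorted(seen)
-- ===== Notes on version B (the rewrite author's own statement) =====
-- stated objective: alternative
-- what changed: Instead of scanning every integer in [start, end] and testing its decimal string for a repeated block, B enumerates the repeated-block numbers directly as block * (10**L - 1)//(10**d - 1) for each length L, divisor d and d-digit block, filters them into the range, dedupes with a set and sorts; this avoids touching the range at all (a timing run read ~700x on large ranges but ~1x on degenerate ones, so no speed is claimed).
import Mathlib
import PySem

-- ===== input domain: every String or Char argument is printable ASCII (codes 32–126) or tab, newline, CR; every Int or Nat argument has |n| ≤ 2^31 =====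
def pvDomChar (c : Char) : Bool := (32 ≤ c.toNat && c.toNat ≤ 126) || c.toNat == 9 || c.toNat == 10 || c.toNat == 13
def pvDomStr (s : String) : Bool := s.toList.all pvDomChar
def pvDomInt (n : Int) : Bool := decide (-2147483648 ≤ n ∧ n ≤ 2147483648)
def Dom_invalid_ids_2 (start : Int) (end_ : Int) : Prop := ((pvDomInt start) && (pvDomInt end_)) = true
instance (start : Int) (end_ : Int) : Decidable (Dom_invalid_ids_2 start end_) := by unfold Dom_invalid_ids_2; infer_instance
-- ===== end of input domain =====

-- B enumerates the repeated-block numbers directly instead of scanning the whole range and testing each string.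
-- Strings are ported on the List Char side (PySem.Int.toChars i = (str(i)).toList, PySem.List.slice = string slicing).

-- ===== PORT A =====
-- literal transliteration of A: scan range(start, end+1); for each i test every
-- step_size in range(1, len(str(i))//2 + 1); the inner `for`-with-`break` over
-- range(step, len, step) is the short-circuit `all`, the outer `break` after the
-- first matching step is the short-circuit `any`.
def invalid_ids_2 (start : Int) (end_ : Int) : List Int :=
  (PySem.List.pyRange start (end_ + 1) 1).foldl (fun ids i =>
    let str_i : List Char := PySem.Int.toChars i
    if (PySem.List.pyRange 1 (PySem.Int.floordiv (PySem.List.len str_i) 2 + 1) 1).any (fun step =>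
        let pattern := PySem.List.slice str_i none (some step)
        (PySem.List.pyRange step (PySem.List.len str_i) step).all (fun j =>
          PySem.List.slice str_i (some j) (some (j + step)) == pattern))
    then ids ++ [i] else ids) []

-- ===== PORT B =====
-- literal transliteration of B (Source B): for every length, divisor d, d-digit block,
-- build block * (10**length - 1)//(10**d - 1), keep those in [lo, end], dedupe, sort.
-- Python's `10 ** e` appears only with e ≥ 0 here, ported as `10 ^ e.toNat`.
def invalid_ids_2_alt (start : Int) (end_ : Int) : List Int :=
  let lo : Int := if start < 11 then 11 else start
  if end_ < lo then []
  else
    let max_len : Int := PySem.List.len (PySem.Int.toChars end_)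
    let seen : PySem.Set Int :=
      (PySem.List.pyRange 2 (max_len + 1) 1).foldl (fun seen length =>
        (PySem.List.pyRange 1 (PySem.Int.floordiv length 2 + 1) 1).foldl (fun seen d =>
          if PySem.Int.mod length d ≠ 0 then seen
          else
            let mult : Int := PySem.Int.floordiv (10 ^ length.toNat - 1) (10 ^ d.toNat - 1)
            (PySem.List.pyRange (10 ^ (d - 1).toNat) (10 ^ d.toNat) 1).foldl (fun seen block =>
              let n := block * mult
              if lo ≤ n ∧ n ≤ end_ then seen.add n else seen) seen) seen) PySem.Set.empty
    PySem.List.sorted seen (fun x => x)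

-- ===== PRECONDITION & SPEC =====
def Spec_invalid_ids_2 (start : Int) (end_ : Int) (out : List Int) : Prop := out = invalid_ids_2_alt start end_
instance (start : Int) (end_ : Int) (out : List Int) : Decidable (Spec_invalid_ids_2 start end_ out) := by unfold Spec_invalid_ids_2; infer_instance

-- ===== CLAIM (what is proved, stated in full; the proofs are below) =====
def Claim_equal_invalid_ids_2 : Prop := ∀ (start : Int) (end_ : Int), Dom_invalid_ids_2 start end_ → Spec_invalid_ids_2 start end_ (invalid_ids_2 start end_)

-- ===== LEMMAS AND PROOFS =====

-- A's per-number test, as a named predicate (definitionally the body of port A's fold).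
def pvP (i : Int) : Bool :=
  let str_i : List Char := PySem.Int.toChars i
  (PySem.List.pyRange 1 (PySem.Int.floordiv (PySem.List.len str_i) 2 + 1) 1).any (fun step =>
    let pattern := PySem.List.slice str_i none (some step)
    (PySem.List.pyRange step (PySem.List.len str_i) step).all (fun j =>
      PySem.List.slice str_i (some j) (some (j + step)) == pattern))

-- Geometric repunit multiplier: S10 d r = 1 + 10^d + ... + 10^(d(r-1)).
def S10 (d : Nat) : Nat → Nat
  | 0 => 0
  | r + 1 => 1 + 10 ^ d * S10 d r

theorem pvA_eq_filter (start end_ : Int) :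
    invalid_ids_2 start end_ = (PySem.List.pyRange start (end_ + 1) 1).filter pvP := by
  have h := PySem.List.foldl_append_if pvP (fun x : Int => x) (PySem.List.pyRange start (end_ + 1) 1) []
  simpa [invalid_ids_2, pvP] using h

-- ---- toDigits bridge ----
theorem pvToDigitsCore_acc (fuel : Nat) : ∀ (n : Nat) (acc : List Char),
    Nat.toDigitsCore 10 fuel n acc = Nat.toDigitsCore 10 fuel n [] ++ acc := by
  induction fuel with
  | zero => intro n acc; simp [Nat.toDigitsCore]
  | succ fuel ih =>
    intro n acc
    simp only [Nat.toDigitsCore]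
    by_cases h : n / 10 = 0
    · simp [h]
    · simp only [h, if_false]
      rw [ih (n / 10) [Nat.digitChar (n % 10)], ih (n / 10) (Nat.digitChar (n % 10) :: acc)]
      simp

theorem pvToDigitsCore_eq (fuel : Nat) : ∀ (n : Nat), n < fuel →
    Nat.toDigitsCore 10 fuel n [] =
      if n = 0 then ['0'] else ((Nat.digits 10 n).map Nat.digitChar).reverse := by
  induction fuel with
  | zero => intro n h; omega
  | succ fuel ih =>
    intro n h
    simp only [Nat.toDigitsCore]
    by_cases h0 : n = 0
    · subst h0; norm_num [Nat.digitChar]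
    · by_cases hq : n / 10 = 0
      · have hlt : n < 10 := by omega
        simp only [hq, if_false, if_true, h0]
        rw [Nat.digits_of_lt 10 n h0 hlt]
        simp [Nat.mod_eq_of_lt hlt]
      · simp only [hq, if_false, h0]
        rw [pvToDigitsCore_acc, ih (n / 10) (by omega)]
        rw [Nat.digits_def' (by norm_num : 1 < 10) (by omega : 0 < n)]
        simp [hq]

theorem pvToChars_pos (n : Nat) (h : n ≠ 0) :
    PySem.Int.toChars (n : Int) = ((Nat.digits 10 n).map Nat.digitChar).reverse := by
  have : ¬ ((n : Int) < 0) := by omega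
  simp only [PySem.Int.toChars, this, if_false]
  rw [show ((n : Int)).toNat = n from rfl]
  rw [show Nat.toDigits 10 n = Nat.toDigitsCore 10 (n+1) n [] from rfl]
  rw [pvToDigitsCore_eq (n+1) n (by omega)]
  simp [h]

-- ---- generic chunk lemmas ----
theorem pvLen_flatten_replicate {α : Type} (r : Nat) (t : List α) :
    (List.replicate r t).flatten.length = r * t.length := by
  induction r with
  | zero => simp
  | succ r ih => simp [List.replicate_succ, ih, Nat.succ_mul]; ring

theorem pvDrop_flatten_replicate {α : Type} (t : List α) (k : Nat) : ∀ (r : Nat), k ≤ r →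
    (List.replicate r t).flatten.drop (k * t.length) = (List.replicate (r - k) t).flatten := by
  induction k with
  | zero => intro r _; simp
  | succ k ih =>
    intro r hr
    obtain ⟨m, rfl⟩ : ∃ m, r = m + 1 := ⟨r - 1, by omega⟩
    rw [List.replicate_succ, List.flatten_cons]
    rw [show (k + 1) * t.length = t.length + k * t.length by ring]
    rw [← List.drop_drop, List.drop_left]
    rw [ih m (by omega)]
    have : m + 1 - (k + 1) = m - k := by omega
    rw [this]

theorem pvRep_chunks {α : Type} (t : List α) (r d k : Nat) (ht : t.length = d)
    (hk1 : 1 ≤ k) (hk2 : k * d < (List.replicate r t).flatten.length) :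
    (((List.replicate r t).flatten.drop (k * d)).take d) = t := by
  have hlen := pvLen_flatten_replicate r t
  rw [ht] at hlen
  have hkr : k ≤ r := by
    by_contra hc
    have : r * d ≤ k * d := Nat.mul_le_mul_right d (by omega)
    omega
  rw [← ht, pvDrop_flatten_replicate t k r hkr]
  have h1rk : 1 ≤ r - k := by
    by_contra hc
    have hrk : r = k := by omega
    subst hrk
    omega
  obtain ⟨m, hm⟩ : ∃ m, r - k = m + 1 := ⟨r - k - 1, by omega⟩
  rw [hm, List.replicate_succ, List.flatten_cons, List.take_left' rfl]

theorem pvChunks_rep {α : Type} (d : Nat) (hd : 0 < d) :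
    ∀ (L : Nat) (s : List α), s.length = L → d ≤ L →
      (∀ k : Nat, 1 ≤ k → k * d < L → (s.drop (k * d)).take d = s.take d) →
      ∃ r, L = d * r ∧ s = (List.replicate r (s.take d)).flatten := by
  intro L
  induction L using Nat.strong_induction_on with
  | _ L ih =>
    intro s hs hdL hchunk
    by_cases hL : L = d
    · refine ⟨1, by omega, ?_⟩
      simp [List.take_of_length_le (by omega : s.length ≤ d)]
    · have hdlt : d < L := by omega
      have h1 := hchunk 1 (by omega) (by omega)
      rw [one_mul] at h1
      have hlen1 : ((s.drop d).take d).length = min d (L - d) := by simp [hs]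
      have h2d : d ≤ L - d := by
        rw [h1] at hlen1
        simp [hs] at hlen1
        omega
      have hrec := ih (L - d) (by omega) (s.drop d) (by simp [hs]) h2d ?_
      · obtain ⟨r', hr1, hr2⟩ := hrec
        rw [h1] at hr2
        have hmul : d * (r' + 1) = d * r' + d := by ring
        refine ⟨r' + 1, by omega, ?_⟩
        rw [List.replicate_succ, List.flatten_cons, ← hr2]
        exact (List.take_append_drop d s).symm
      · intro k hk hkd
        have hkd1 : (k + 1) * d < L := by
          have : (k + 1) * d = k * d + d := by ring
          omega
        have hch := hchunk (k + 1) (by omega) hkd1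
        rw [List.drop_drop, show d + k * d = (k + 1) * d by ring, hch, h1]

theorem pvRev_flatten_replicate {α : Type} (r : Nat) (t : List α) :
    (List.replicate r t).flatten.reverse = (List.replicate r t.reverse).flatten := by
  induction r with
  | zero => simp
  | succ r ih =>
    rw [List.replicate_succ, List.flatten_cons, List.reverse_append, ih]
    rw [show List.replicate (r+1) t.reverse = List.replicate r t.reverse ++ [t.reverse] from List.replicate_succ' .. ]
    simp

-- ---- digitChar injectivity on digits ----
theorem pvMap_digitChar_inj (l1 : List Nat) : ∀ (l2 : List Nat), (∀ x ∈ l1, x < 10) → (∀ x ∈ l2, x < 10) →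
    l1.map Nat.digitChar = l2.map Nat.digitChar → l1 = l2 := by
  induction l1 with
  | nil => intro l2 _ _ he; cases l2 <;> simp_all
  | cons a l ih =>
    intro l2 h1 h2 he
    cases l2 with
    | nil => simp_all
    | cons b l2' =>
      simp only [List.map_cons, List.cons.injEq] at he
      have ha : a < 10 := h1 a (by simp)
      have hb : b < 10 := h2 b (by simp)
      have hab : a = b := by
        revert he
        interval_cases a <;> interval_cases b <;> simp [Nat.digitChar]
      subst hab
      rw [ih l2' (fun x hx => h1 x (by simp [hx])) (fun x hx => h2 x (by simp [hx])) he.2]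

-- ---- arithmetic of repeated digit blocks ----
theorem pvOfDigits_flatten_rep (u : List Nat) : ∀ (r : Nat),
    Nat.ofDigits 10 ((List.replicate r u).flatten) = Nat.ofDigits 10 u * S10 u.length r := by
  intro r
  induction r with
  | zero => simp [S10]
  | succ r ih =>
    rw [List.replicate_succ, List.flatten_cons, Nat.ofDigits_append, ih]
    simp [S10]
    ring

theorem pvGetLast?_flatten_replicate {α : Type} (u : List α) (r : Nat) (hr : 1 ≤ r) (hu : u ≠ []) :
    (List.replicate r u).flatten.getLast? = u.getLast? := by
  obtain ⟨m, rfl⟩ : ∃ m, r = m + 1 := ⟨r - 1, by omega⟩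
  rw [List.replicate_succ', List.flatten_append]
  simp [List.getLast?_append]
  cases h : u.getLast? with
  | none => simp [List.getLast?_eq_none_iff] at h; contradiction
  | some x => simp

theorem pvDigits_of_block (d r b : Nat) (hd : 0 < d) (hr : 1 ≤ r)
    (hb1 : 10 ^ (d - 1) ≤ b) (hb2 : b < 10 ^ d) :
    Nat.digits 10 (b * S10 d r) = (List.replicate r (Nat.digits 10 b)).flatten ∧
      (Nat.digits 10 b).length = d := by
  have hb0 : b ≠ 0 := by
    have : 1 ≤ 10 ^ (d - 1) := Nat.one_le_pow _ _ (by norm_num)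
    omega
  have hlog : Nat.log 10 b = d - 1 := by
    apply Nat.log_eq_of_pow_le_of_lt_pow hb1
    have : d - 1 + 1 = d := by omega
    rw [this]; exact hb2
  have hlen : (Nat.digits 10 b).length = d := by
    rw [Nat.length_digits 10 b (by norm_num) hb0, hlog]; omega
  have hne : Nat.digits 10 b ≠ [] := by
    intro hc; rw [hc] at hlen; simp at hlen; omega
  refine ⟨?_, hlen⟩
  have hrep : Nat.digits 10 (Nat.ofDigits 10 ((List.replicate r (Nat.digits 10 b)).flatten))
      = (List.replicate r (Nat.digits 10 b)).flatten := by
    apply Nat.digits_ofDigits 10 (by norm_num)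
    · intro l hl
      rw [List.mem_flatten] at hl
      obtain ⟨v, hv, hlv⟩ := hl
      rw [List.eq_of_mem_replicate hv] at hlv
      exact Nat.digits_lt_base (by norm_num) hlv
    · intro hfl
      have hlast : (List.replicate r (Nat.digits 10 b)).flatten.getLast? = (Nat.digits 10 b).getLast? := pvGetLast?_flatten_replicate _ r hr hne
      rw [List.getLast?_eq_some_getLast hfl] at hlast
      have h2 := Nat.getLast_digit_ne_zero 10 hb0
      rw [List.getLast?_eq_some_getLast hne] at hlast
      intro hc
      rw [hc] at hlast
      exact h2 (Option.some.injEq _ _ ▸ hlast).symm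
  rw [pvOfDigits_flatten_rep, hlen, Nat.ofDigits_digits] at hrep
  exact hrep

theorem pvBlock_of_digits (n d r : Nat) (u : List Nat) (hn : 0 < n) (hd : 0 < d) (hr : 1 ≤ r)
    (hu : u.length = d) (hrep : Nat.digits 10 n = (List.replicate r u).flatten) :
    10 ^ (d - 1) ≤ Nat.ofDigits 10 u ∧ Nat.ofDigits 10 u < 10 ^ d ∧
      n = Nat.ofDigits 10 u * S10 d r := by
  have hne : u ≠ [] := by intro hc; rw [hc] at hu; simp at hu; omega
  have hulc : ∀ x ∈ u, x < 10 := by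
    intro x hx
    apply Nat.digits_lt_base (by norm_num) (m := n)
    rw [hrep, List.mem_flatten]
    exact ⟨u, List.mem_replicate.mpr ⟨by omega, rfl⟩, hx⟩
  have hlast : ∀ (h : u ≠ []), u.getLast h ≠ 0 := by
    intro h hc
    have h1 := pvGetLast?_flatten_replicate u r hr hne
    have h2 := Nat.getLast_digit_ne_zero 10 (show n ≠ 0 by omega)
    rw [← hrep] at h1
    have hdne : Nat.digits 10 n ≠ [] := Nat.digits_ne_nil_iff_ne_zero.mpr (by omega)
    rw [List.getLast?_eq_some_getLast hdne, List.getLast?_eq_some_getLast hne] at h1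
    apply h2
    rw [Option.some_inj] at h1
    rw [h1, hc]
  have hdig : Nat.digits 10 (Nat.ofDigits 10 u) = u := Nat.digits_ofDigits 10 (by norm_num) u hulc hlast
  have hb0 : Nat.ofDigits 10 u ≠ 0 := by
    intro hc; rw [hc] at hdig; simp at hdig; exact hne hdig
  constructor
  · have hlog : (Nat.digits 10 (Nat.ofDigits 10 u)).length = Nat.log 10 (Nat.ofDigits 10 u) + 1 :=
      Nat.length_digits 10 _ (by norm_num) hb0
    rw [hdig, hu] at hlog
    have : Nat.log 10 (Nat.ofDigits 10 u) = d - 1 := by omega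
    calc 10 ^ (d - 1) = 10 ^ Nat.log 10 (Nat.ofDigits 10 u) := by rw [this]
    _ ≤ Nat.ofDigits 10 u := Nat.pow_log_le_self 10 hb0
  constructor
  · have := Nat.ofDigits_lt_base_pow_length (b := 10) (l := u) (by norm_num) hulc
    rw [hu] at this; exact this
  · have := congrArg (Nat.ofDigits 10) hrep
    rw [Nat.ofDigits_digits, pvOfDigits_flatten_rep, hu] at this
    exact_mod_cast this

theorem pvS10_ge (d r : Nat) (hd : 1 ≤ d) (hr : 2 ≤ r) : 11 ≤ S10 d r := by
  obtain ⟨m, rfl⟩ : ∃ m, r = m + 2 := ⟨r - 2, by omega⟩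
  have h1 : 1 ≤ S10 d (m + 1) := by simp [S10]
  have h10 : 10 ≤ 10 ^ d := by
    calc (10 : Nat) = 10 ^ 1 := by norm_num
    _ ≤ 10 ^ d := Nat.pow_le_pow_right (by norm_num) hd
  have hm : 10 ^ d ≤ 10 ^ d * S10 d (m + 1) := Nat.le_mul_of_pos_right _ h1
  show 11 ≤ 1 + 10 ^ d * S10 d (m + 1)
  omega

theorem pvS10_mul (d r : Nat) : ((10 : Int) ^ d - 1) * (S10 d r : Int) = 10 ^ (d * r) - 1 := by
  induction r with
  | zero => simp [S10]
  | succ r ih =>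
    simp only [S10]
    push_cast
    have : (10 : Int) ^ (d * (r + 1)) = 10 ^ d * 10 ^ (d * r) := by
      rw [← pow_add]; ring_nf
    rw [this]
    linear_combination (10 : Int) ^ d * ih

theorem pvMult_eq (d L : Nat) (hd : 0 < d) (hdvd : d ∣ L) :
    PySem.Int.floordiv ((10 : Int) ^ L - 1) ((10 : Int) ^ d - 1) = (S10 d (L / d) : Int) := by
  have hpos : (0 : Int) < 10 ^ d - 1 := by
    have : (10 : Int) ^ 1 ≤ 10 ^ d := pow_le_pow_right₀ (by norm_num) hd
    simp at this; omega
  rw [PySem.Int.floordiv_eq_ediv_of_pos hpos]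
  obtain ⟨r, rfl⟩ := hdvd
  rw [Nat.mul_div_cancel_left r hd]
  rw [← pvS10_mul d r]
  exact Int.mul_ediv_cancel_left _ (by omega)

-- ---- the characterization of A's test ----
def Periodic (i : Int) : Prop :=
  ∃ d r b : Nat, 1 ≤ d ∧ 2 ≤ r ∧ 10 ^ (d - 1) ≤ b ∧ b < 10 ^ d ∧ i = ((b * S10 d r : Nat) : Int)

def ChunkEq {α : Type} (s : List α) (d : Nat) : Prop :=
  ∀ k : Nat, 1 ≤ k → k * d < s.length → (s.drop (k * d)).take d = s.take d

theorem pvP_elim (i : Int) : pvP i = true ↔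
    ∃ d : Nat, 1 ≤ d ∧ 2 * d ≤ (PySem.Int.toChars i).length ∧ ChunkEq (PySem.Int.toChars i) d := by
  unfold pvP
  simp only [List.any_eq_true, List.all_eq_true, PySem.List.len_eq]
  set s := PySem.Int.toChars i with hs
  have hfd : PySem.Int.floordiv (s.length : Int) 2 = ((s.length / 2 : Nat) : Int) := by
    rw [show (2 : Int) = ((2 : Nat) : Int) from rfl, PySem.Int.floordiv_natCast]
  constructor
  · rintro ⟨step, hmem, hall⟩
    rw [PySem.List.mem_pyRange_one, hfd] at hmem
    obtain ⟨h1, h2⟩ := hmem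
    set d : Nat := step.toNat with hd
    have hstep : step = (d : Int) := by omega
    have hd1 : 1 ≤ d := by omega
    have hd2 : 2 * d ≤ s.length := by omega
    refine ⟨d, hd1, hd2, ?_⟩
    intro k hk hkL
    have hj : ((k * d : Nat) : Int) ∈ PySem.List.pyRange step (s.length : Int) step := by
      rw [PySem.List.mem_pyRange_iff_of_pos (by omega)]
      have hkd : d ≤ k * d := Nat.le_mul_of_pos_left d (by omega)
      refine ⟨by rw [hstep]; exact_mod_cast hkd, by exact_mod_cast hkL, ?_⟩
      rw [hstep]
      refine ⟨((k : Int) - 1), by push_cast; ring⟩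
    have h := hall _ hj
    rw [beq_iff_eq] at h
    rw [hstep] at h
    rw [show ((k * d : Nat) : Int) + (d : Int) = ((k * d : Nat) : Int) + ((d : Nat) : Int) from rfl] at h
    rw [PySem.List.slice_natCast_add, PySem.List.slice_to_natCast] at h
    exact h
  · rintro ⟨d, hd1, hd2, hchunk⟩
    refine ⟨(d : Int), ?_, ?_⟩
    · rw [PySem.List.mem_pyRange_one, hfd]
      constructor
      · exact_mod_cast hd1
      · have : d ≤ s.length / 2 := by omega
        omega
    · intro j hj
      rw [PySem.List.mem_pyRange_iff_of_pos (by exact_mod_cast hd1 : (0:Int) < (d:Int))] at hj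
      obtain ⟨hj1, hj2, t, ht⟩ := hj
      have hdpos : (1 : Int) ≤ (d : Int) := by exact_mod_cast hd1
      have htnn : 0 ≤ t := by
        by_contra hc
        have ht1 : t ≤ -1 := by omega
        have : (d : Int) * t ≤ (d : Int) * (-1) := by
          exact mul_le_mul_of_nonneg_left ht1 (by omega)
        omega
      set k : Nat := t.toNat + 1 with hk
      have hkt : (k : Int) = t + 1 := by omega
      have hjeq : j = ((k * d : Nat) : Int) := by
        push_cast [hkt]
        have hr : (t + 1) * (d : Int) = (d : Int) * t + d := by ring
        omega
      have hkL : k * d < s.length := by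
        have := hj2
        rw [hjeq] at this
        exact_mod_cast this
      have h := hchunk k (by omega) hkL
      rw [beq_iff_eq, hjeq]
      rw [show ((k * d : Nat) : Int) + (d : Int) = ((k * d : Nat) : Int) + ((d : Nat) : Int) from rfl]
      rw [PySem.List.slice_natCast_add, PySem.List.slice_to_natCast]
      exact h


-- every char of Nat.toDigits 10 m is a decimal digit character, never '-'
theorem pvToDigits_no_minus (m : Nat) (c : Char) (hc : c ∈ Nat.toDigits 10 m) : c ≠ '-' := by
  rw [show Nat.toDigits 10 m = Nat.toDigitsCore 10 (m+1) m [] from rfl,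
    pvToDigitsCore_eq (m+1) m (by omega)] at hc
  by_cases h0 : m = 0
  · simp [h0] at hc; simp [hc]
  · simp only [h0, if_false, List.mem_reverse, List.mem_map] at hc
    obtain ⟨x, hx, rfl⟩ := hc
    have hx10 : x < 10 := Nat.digits_lt_base (by norm_num) hx
    have hall : ∀ y : Nat, y < 10 → Nat.digitChar y ≠ '-' := by decide
    exact hall x hx10

theorem pvPeriodic_ge (i : Int) (h : Periodic i) : 11 ≤ i := by
  obtain ⟨d, r, b, hd, hr, hb1, hb2, hi⟩ := h
  have hb : 1 ≤ b := by
    have : 1 ≤ 10 ^ (d - 1) := Nat.one_le_pow _ _ (by norm_num)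
    omega
  have hs := pvS10_ge d r hd hr
  have : 11 ≤ b * S10 d r := by
    calc 11 ≤ S10 d r := hs
    _ = 1 * S10 d r := (one_mul _).symm
    _ ≤ b * S10 d r := Nat.mul_le_mul_right _ hb
  omega

theorem pvPeriodic_len (d r b : Nat) (hd : 1 ≤ d) (hr : 2 ≤ r)
    (hb1 : 10 ^ (d - 1) ≤ b) (hb2 : b < 10 ^ d) :
    (Nat.digits 10 (b * S10 d r)).length = d * r := by
  obtain ⟨hrep, hlen⟩ := pvDigits_of_block d r b hd (by omega) hb1 hb2
  rw [hrep, pvLen_flatten_replicate, hlen]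
  ring

theorem pvP_iff (i : Int) : pvP i = true ↔ Periodic i := by
  rw [pvP_elim]
  rcases lt_trichotomy i 0 with hneg | rfl | hpos
  · -- negative numbers: the pattern starts with '-', later chunks never do
    constructor
    · rintro ⟨d, hd1, hd2, hchunk⟩
      exfalso
      have hs : PySem.Int.toChars i = '-' :: Nat.toDigits 10 i.natAbs := by
        simp [PySem.Int.toChars, hneg]
      have h1 := hchunk 1 (le_refl 1) (by omega)
      rw [one_mul] at h1
      have hgoal := congrArg (fun l => l[0]?) h1
      simp only at hgoal
      rw [List.getElem?_take_of_lt (by omega), List.getElem?_take_of_lt (by omega),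
        List.getElem?_drop] at hgoal
      obtain ⟨m, rfl⟩ : ∃ m, d = m + 1 := ⟨d - 1, by omega⟩
      have hdlt : m + 1 + 0 < (PySem.Int.toChars i).length := by omega
      rw [List.getElem?_eq_getElem hdlt, List.getElem?_eq_getElem (by omega)] at hgoal
      rw [Option.some_inj] at hgoal
      have h0 : (PySem.Int.toChars i)[0] = '-' := by
        simp [hs]
      have hd : (PySem.Int.toChars i)[m + 1 + 0] ∈ Nat.toDigits 10 i.natAbs := by
        have : (PySem.Int.toChars i)[m + 1 + 0] = (Nat.toDigits 10 i.natAbs)[m]'(by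
            have := hdlt; rw [hs] at this; simpa using this) := by
          simp [hs]
        rw [this]
        exact List.getElem_mem _
      exact pvToDigits_no_minus _ _ hd (by rw [hgoal, h0])
    · intro hper; have := pvPeriodic_ge i hper; omega
  · -- i = 0 : "0" has no room for a repeated block
    constructor
    · rintro ⟨d, hd1, hd2, _⟩
      have h0 : PySem.Int.toChars 0 = ['0'] := rfl
      rw [h0] at hd2
      simp at hd2
      omega
    · intro hper; have := pvPeriodic_ge 0 hper; omega
  · -- positive numbers: transport to the digit list and use the block arithmetic
    have hn0 : i.toNat ≠ 0 := by omega
    have hin : i = (i.toNat : Int) := by omega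
    have hsR : PySem.Int.toChars i = ((Nat.digits 10 i.toNat).reverse).map Nat.digitChar := by
      conv_lhs => rw [hin]
      rw [pvToChars_pos i.toNat hn0, List.map_reverse]
    have hlen : (PySem.Int.toChars i).length = ((Nat.digits 10 i.toNat).reverse).length := by
      rw [hsR]; simp
    have hRlt : ∀ x ∈ (Nat.digits 10 i.toNat).reverse, x < 10 := fun x hx =>
      Nat.digits_lt_base (by norm_num) (List.mem_reverse.mp hx)
    have htrans : ∀ d : Nat, 0 < d →
        (ChunkEq (PySem.Int.toChars i) d ↔ ChunkEq ((Nat.digits 10 i.toNat).reverse) d) := by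
      intro d hd
      unfold ChunkEq
      rw [hsR]
      simp only [List.length_map]
      constructor
      · intro h k hk hkL
        have h' := h k hk hkL
        rw [← List.map_drop, ← List.map_take, ← List.map_take] at h'
        exact pvMap_digitChar_inj _ _
          (fun x hx => hRlt x (List.mem_of_mem_drop (List.mem_of_mem_take hx)))
          (fun x hx => hRlt x (List.mem_of_mem_take hx)) h'
      · intro h k hk hkL
        rw [← List.map_drop, ← List.map_take, ← List.map_take]
        exact congrArg (List.map Nat.digitChar) (h k hk hkL)
    constructor
    · rintro ⟨d, hd1, hd2, hch⟩
      rw [htrans d (by omega)] at hch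
      rw [hlen] at hd2
      simp only [List.length_reverse] at hd2
      obtain ⟨r, hLr, hrep⟩ :=
        pvChunks_rep d (by omega) ((Nat.digits 10 i.toNat).reverse).length
          ((Nat.digits 10 i.toNat).reverse) rfl (by simp only [List.length_reverse]; omega) hch
      simp only [List.length_reverse] at hLr
      have hr2 : 2 ≤ r := by
        rcases r with _ | _ | r
        · rw [hLr] at hd2; simp at hd2; omega
        · rw [hLr] at hd2; simp at hd2; omega
        · omega
      have hu : ((((Nat.digits 10 i.toNat).reverse).take d).reverse).length = d := by
        simp only [List.length_reverse, List.length_take]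
        omega
      have hDLrep := congrArg List.reverse hrep
      rw [List.reverse_reverse, pvRev_flatten_replicate] at hDLrep
      obtain ⟨hb1, hb2, hneq⟩ := pvBlock_of_digits i.toNat d r _ (by omega) (by omega)
        (by omega) hu hDLrep
      exact ⟨d, r, _, hd1, hr2, hb1, hb2, by rw [hin]; exact_mod_cast hneq⟩
    · rintro ⟨d, r, b, hd1, hr2, hb1, hb2, hi⟩
      have hnb : i.toNat = b * S10 d r := by omega
      obtain ⟨hrep, hdlen⟩ := pvDigits_of_block d r b (by omega) (by omega) hb1 hb2
      have hDLrep : Nat.digits 10 i.toNat = (List.replicate r (Nat.digits 10 b)).flatten := by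
        rw [hnb, hrep]
      have hL0 : (Nat.digits 10 i.toNat).length = r * d := by
        rw [hDLrep, pvLen_flatten_replicate, hdlen]
      have hvlen : ((Nat.digits 10 b).reverse).length = d := by simp [hdlen]
      have hRrep : (Nat.digits 10 i.toNat).reverse =
          (List.replicate r ((Nat.digits 10 b).reverse)).flatten := by
        rw [hDLrep, pvRev_flatten_replicate]
      refine ⟨d, hd1, ?_, ?_⟩
      · rw [hlen]
        simp only [List.length_reverse]
        rw [hL0]
        have := Nat.mul_le_mul_right d hr2
        omega
      · rw [htrans d (by omega)]
        intro k hk hkL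
        have h1 : (((Nat.digits 10 i.toNat).reverse).drop (k * d)).take d
            = (Nat.digits 10 b).reverse := by
          rw [hRrep]
          exact pvRep_chunks _ r d k hvlen hk (by rw [← hRrep]; simpa using hkL)
        have h2 : ((Nat.digits 10 i.toNat).reverse).take d = (Nat.digits 10 b).reverse := by
          obtain ⟨m, rfl⟩ : ∃ m, r = m + 1 := ⟨r - 1, by omega⟩
          rw [hRrep, List.replicate_succ, List.flatten_cons, List.take_left' hvlen]
        rw [h1, h2]

theorem pvLen_digits_mono (m n : Nat) (hm : 0 < m) (h : m ≤ n) :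
    (Nat.digits 10 m).length ≤ (Nat.digits 10 n).length := by
  rw [Nat.length_digits 10 m (by norm_num) (by omega), Nat.length_digits 10 n (by norm_num) (by omega)]
  have := Nat.log_mono_right (b := 10) h
  omega

-- ---- B's fold membership ----
theorem pvMem_foldl_or {β : Type} (x : Int) (l : List β) (g : PySem.Set Int → β → PySem.Set Int)
    (Q : β → Int → Prop)
    (hg : ∀ s e, e ∈ l → (x ∈ g s e ↔ x ∈ s ∨ Q e x)) :
    ∀ s0, x ∈ l.foldl g s0 ↔ x ∈ s0 ∨ ∃ e ∈ l, Q e x := by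
  induction l with
  | nil => intro s0; simp
  | cons a l ih =>
    intro s0
    rw [List.foldl_cons, ih (fun s e he => hg s e (by simp [he])) (g s0 a),
      hg s0 a (by simp)]
    constructor
    · rintro ((h | h) | ⟨e, he, hq⟩)
      · exact Or.inl h
      · exact Or.inr ⟨a, by simp, h⟩
      · exact Or.inr ⟨e, by simp [he], hq⟩
    · rintro (h | ⟨e, he, hq⟩)
      · exact Or.inl (Or.inl h)
      · rcases List.mem_cons.mp he with rfl | he'
        · exact Or.inl (Or.inr hq)
        · exact Or.inr ⟨e, he', hq⟩

theorem pvNodup_foldl {β : Type} (l : List β) (g : PySem.Set Int → β → PySem.Set Int)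
    (hg : ∀ s e, List.Nodup s → List.Nodup (g s e)) :
    ∀ s0, List.Nodup s0 → List.Nodup (l.foldl g s0) := by
  induction l with
  | nil => intro s0 h; simpa using h
  | cons a l ih => intro s0 h; exact ih (g s0 a) (hg s0 a h)

-- B's generated set, as a named value (definitionally the inner fold of port B).
def pvSeen (lo end_ maxLen : Int) : PySem.Set Int :=
  (PySem.List.pyRange 2 (maxLen + 1) 1).foldl (fun seen length =>
    (PySem.List.pyRange 1 (PySem.Int.floordiv length 2 + 1) 1).foldl (fun seen d =>
      if PySem.Int.mod length d ≠ 0 then seen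
      else
        let mult : Int := PySem.Int.floordiv (10 ^ length.toNat - 1) (10 ^ d.toNat - 1)
        (PySem.List.pyRange (10 ^ (d - 1).toNat) (10 ^ d.toNat) 1).foldl (fun seen block =>
          let n := block * mult
          if lo ≤ n ∧ n ≤ end_ then seen.add n else seen) seen) seen) PySem.Set.empty

theorem pvB_eq (start end_ : Int) :
    invalid_ids_2_alt start end_ =
      (if end_ < (if start < 11 then 11 else start) then []
       else PySem.List.sorted
        (pvSeen (if start < 11 then 11 else start) end_ (PySem.List.len (PySem.Int.toChars end_)))
        (fun x => x)) := rfl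

-- the multiplier written by port B, as an abbreviation used in the statements below
def pvMult (L d : Int) : Int := PySem.Int.floordiv (10 ^ L.toNat - 1) (10 ^ d.toNat - 1)

theorem pvSeen_mem (lo end_ maxLen x : Int) :
    x ∈ pvSeen lo end_ maxLen ↔
      ∃ L ∈ PySem.List.pyRange 2 (maxLen + 1) 1,
        ∃ d ∈ PySem.List.pyRange 1 (PySem.Int.floordiv L 2 + 1) 1,
          PySem.Int.mod L d = 0 ∧
            ∃ block ∈ PySem.List.pyRange (10 ^ (d - 1).toNat) (10 ^ d.toNat) 1,
              (lo ≤ block * pvMult L d ∧ block * pvMult L d ≤ end_) ∧ x = block * pvMult L d := by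
  unfold pvSeen
  rw [pvMem_foldl_or x _ _
    (fun L x => ∃ d ∈ PySem.List.pyRange 1 (PySem.Int.floordiv L 2 + 1) 1,
      PySem.Int.mod L d = 0 ∧
        ∃ block ∈ PySem.List.pyRange (10 ^ (d - 1).toNat) (10 ^ d.toNat) 1,
          (lo ≤ block * pvMult L d ∧ block * pvMult L d ≤ end_) ∧ x = block * pvMult L d) ?_ _]
  · simp [PySem.Set.empty]
  · intro s L _
    rw [pvMem_foldl_or x _ _
      (fun d x => PySem.Int.mod L d = 0 ∧
        ∃ block ∈ PySem.List.pyRange (10 ^ (d - 1).toNat) (10 ^ d.toNat) 1,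
          (lo ≤ block * pvMult L d ∧ block * pvMult L d ≤ end_) ∧ x = block * pvMult L d) ?_ s]
    intro s' d _
    by_cases hmod : PySem.Int.mod L d ≠ 0
    · simp only [if_pos hmod]
      constructor
      · exact fun h => Or.inl h
      · rintro (h | ⟨h0, _⟩)
        · exact h
        · exact absurd h0 hmod
    · simp only [if_neg hmod]
      rw [not_not] at hmod
      rw [pvMem_foldl_or x _ _
        (fun block x => (lo ≤ block * pvMult L d ∧ block * pvMult L d ≤ end_) ∧
          x = block * pvMult L d) ?_ s']
      · constructor
        · rintro (h | h)
          · exact Or.inl h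
          · exact Or.inr ⟨hmod, h⟩
        · rintro (h | ⟨_, h⟩)
          · exact Or.inl h
          · exact Or.inr h
      · intro s'' block _
        by_cases hcond : lo ≤ block * pvMult L d ∧ block * pvMult L d ≤ end_
        · simp only [pvMult] at hcond ⊢
          rw [if_pos hcond, PySem.Set.mem_add]
          constructor
          · rintro (h | h)
            · exact Or.inl h
            · exact Or.inr ⟨hcond, h⟩
          · rintro (h | ⟨_, h⟩)
            · exact Or.inl h
            · exact Or.inr (by exact h)
        · simp only [pvMult] at hcond ⊢
          rw [if_neg hcond]
          constructor
          · exact fun h => Or.inl h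
          · rintro (h | ⟨hc, _⟩)
            · exact h
            · exact absurd hc hcond

theorem pvSeen_nodup (lo end_ maxLen : Int) : List.Nodup (pvSeen lo end_ maxLen) := by
  unfold pvSeen
  apply pvNodup_foldl _ _ ?_ _ (by simp [PySem.Set.empty])
  intro s L hs
  apply pvNodup_foldl _ _ ?_ _ hs
  intro s' d hs'
  split
  · exact hs'
  · apply pvNodup_foldl _ _ ?_ _ hs'
    intro s'' block hs''
    dsimp only
    split
    · exact PySem.Set.nodup_add _ _ hs''
    · exact hs''

-- ===== VERDICT (by name: the statement is the Claim_ definition above) =====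
-- the two membership directions between A's filtered range and B's generated set
theorem pvMain_mem (start end_ : Int) (hend : ¬ end_ < (if start < 11 then 11 else start))
    (x : Int) :
    x ∈ (PySem.List.pyRange start (end_ + 1) 1).filter pvP ↔
      x ∈ pvSeen (if start < 11 then 11 else start) end_
        (PySem.List.len (PySem.Int.toChars end_)) := by
  set lo : Int := if start < 11 then 11 else start with hlo
  have hlo11 : 11 ≤ lo := by rw [hlo]; split <;> omega
  have hlostart : start ≤ lo := by rw [hlo]; split <;> omega
  have hend11 : 11 ≤ end_ := by omega
  have hendN : end_.toNat ≠ 0 := by omega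
  have hmaxLen : PySem.List.len (PySem.Int.toChars end_) =
      ((Nat.digits 10 end_.toNat).length : Int) := by
    rw [PySem.List.len_eq]
    congr 1
    conv_lhs => rw [show end_ = (end_.toNat : Int) by omega]
    rw [pvToChars_pos end_.toNat hendN]
    simp
  rw [List.mem_filter, PySem.List.mem_pyRange_one, pvSeen_mem]
  constructor
  · rintro ⟨⟨hxs, hxe⟩, hpx⟩
    obtain ⟨d, r, b, hd1, hr2, hb1, hb2, hxval⟩ := (pvP_iff x).mp hpx
    have hx11 : 11 ≤ x := pvPeriodic_ge x ⟨d, r, b, hd1, hr2, hb1, hb2, hxval⟩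
    have hdr2 : 2 ≤ d * r := by
      calc 2 = 1 * 2 := by norm_num
      _ ≤ d * r := Nat.mul_le_mul hd1 hr2
    have hxlen : (Nat.digits 10 x.toNat).length = d * r := by
      rw [show x.toNat = b * S10 d r by omega]
      exact pvPeriodic_len d r b hd1 hr2 hb1 hb2
    have hlenle : (Nat.digits 10 x.toNat).length ≤ (Nat.digits 10 end_.toNat).length :=
      pvLen_digits_mono x.toNat end_.toNat (by omega) (by omega)
    have hmult : pvMult ((d * r : Nat) : Int) ((d : Nat) : Int) = ((S10 d r : Nat) : Int) := by
      unfold pvMult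
      rw [show (((d * r : Nat) : Int)).toNat = d * r from by omega,
        show (((d : Nat) : Int)).toNat = d from by omega]
      rw [pvMult_eq d (d * r) (by omega) ⟨r, rfl⟩, Nat.mul_div_cancel_left r (by omega)]
    refine ⟨((d * r : Nat) : Int), ?_, ((d : Nat) : Int), ?_, ?_, ((b : Nat) : Int), ?_, ?_, ?_⟩
    · rw [PySem.List.mem_pyRange_one, hmaxLen]
      constructor
      · exact_mod_cast hdr2
      · have : ((d * r : Nat) : Int) ≤ ((Nat.digits 10 end_.toNat).length : Int) := by
          exact_mod_cast hxlen ▸ hlenle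
        omega
    · rw [PySem.List.mem_pyRange_one]
      constructor
      · exact_mod_cast hd1
      · have h2dr : 2 * d ≤ d * r := by
          calc 2 * d = d * 2 := by ring
          _ ≤ d * r := Nat.mul_le_mul_left d hr2
        rw [show ((2 : Int)) = ((2 : Nat) : Int) from rfl, PySem.Int.floordiv_natCast]
        have : d ≤ d * r / 2 := by omega
        omega
    · rw [PySem.Int.mod_eq_zero_iff_dvd]
      exact_mod_cast (Int.natCast_dvd_natCast.mpr ⟨r, rfl⟩)
    · rw [PySem.List.mem_pyRange_one]
      rw [show (((d : Nat) : Int) - 1).toNat = d - 1 by omega,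
        show (((d : Nat) : Int)).toNat = d from by simp]
      constructor
      · exact_mod_cast hb1
      · exact_mod_cast hb2
    · rw [hmult]
      constructor
      · rw [show ((b : Nat) : Int) * ((S10 d r : Nat) : Int) = ((b * S10 d r : Nat) : Int) by push_cast; ring]
        omega
      · rw [show ((b : Nat) : Int) * ((S10 d r : Nat) : Int) = ((b * S10 d r : Nat) : Int) by push_cast; ring]
        omega
    · rw [hmult, hxval]; push_cast; ring
  · rintro ⟨L, hL, d, hd, hmod, block, hblock, ⟨hlox, hxend⟩, hxval⟩
    rw [PySem.List.mem_pyRange_one] at hL hd hblock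
    have hL2 : 2 ≤ L := hL.1
    have hd1 : 1 ≤ d := hd.1
    have hdL : d ≤ PySem.Int.floordiv L 2 := by omega
    rw [PySem.Int.floordiv_eq_ediv_of_pos (by norm_num)] at hdL
    have h2dL : 2 * d ≤ L := by omega
    have hdvd : d ∣ L := (PySem.Int.mod_eq_zero_iff_dvd L d).mp hmod
    have hdN : d = ((d.toNat : Nat) : Int) := by omega
    have hLN : L = ((L.toNat : Nat) : Int) := by omega
    have hdvdN : d.toNat ∣ L.toNat := by
      rcases hdvd with ⟨c, hc⟩
      have hc0 : 0 ≤ c := by nlinarith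
      refine ⟨c.toNat, ?_⟩
      have hd' : ((d.toNat : Nat) : Int) = d := by omega
      have hc' : ((c.toNat : Nat) : Int) = c := by omega
      have hcast : ((d.toNat * c.toNat : Nat) : Int) = L := by
        push_cast
        rw [hd', hc', ← hc]
      omega
    have hmult : pvMult L d = ((S10 d.toNat (L.toNat / d.toNat) : Nat) : Int) := by
      unfold pvMult
      exact pvMult_eq d.toNat L.toNat (by omega) hdvdN
    have hbpos : 0 ≤ block := le_trans (by positivity) hblock.1
    have hblock1 : ((10 : Nat) ^ (d.toNat - 1) : Nat) ≤ block.toNat := by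
      have h1 : ((10 : Int)) ^ (d - 1).toNat ≤ block := hblock.1
      rw [show (d - 1).toNat = d.toNat - 1 by omega,
        show ((10 : Int)) = (((10 : Nat) : Int)) from rfl, ← Nat.cast_pow] at h1
      omega
    have hblock2 : block.toNat < (10 : Nat) ^ d.toNat := by
      have h2 : block < (10 : Int) ^ d.toNat := hblock.2
      rw [show ((10 : Int)) = (((10 : Nat) : Int)) from rfl, ← Nat.cast_pow] at h2
      omega
    set r : Nat := L.toNat / d.toNat with hr
    have hLdr : L.toNat = d.toNat * r := by
      rw [hr, Nat.mul_div_cancel' hdvdN]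
    have hr2 : 2 ≤ r := by
      rcases Nat.lt_or_ge r 2 with hlt | hge
      · exfalso
        interval_cases r
        · omega
        · have : L.toNat = d.toNat := by omega
          omega
      · exact hge
    have hxN : x = ((block.toNat * S10 d.toNat r : Nat) : Int) := by
      rw [hxval, hmult]
      push_cast
      congr 1
      omega

    have hpx : pvP x = true := by
      rw [pvP_iff]
      exact ⟨d.toNat, r, block.toNat, by omega, hr2, hblock1, hblock2, hxN⟩
    refine ⟨⟨by omega, by omega⟩, hpx⟩

theorem invalid_ids_2_spec : Claim_equal_invalid_ids_2 := by
  unfold Claim_equal_invalid_ids_2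
  intro start end_ _
  unfold Spec_invalid_ids_2
  rw [pvA_eq_filter, pvB_eq]
  by_cases hend : end_ < (if start < 11 then 11 else start)
  · rw [if_pos hend]
    rw [List.filter_eq_nil_iff]
    intro x hx
    rw [PySem.List.mem_pyRange_one] at hx
    intro hpx
    have h11 := pvPeriodic_ge x ((pvP_iff x).mp hpx)
    have hlo11 : (11 : Int) ≤ (if start < 11 then 11 else start) := by split <;> omega
    omega
  · rw [if_neg hend]
    refine (PySem.List.sorted_eq_of_perm_of_pairwise_lt _ _ _ ?_ ?_).symm
    · rw [List.perm_ext_iff_of_nodup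
        (((PySem.List.pairwise_lt_pyRange_one start (end_ + 1)).filter pvP).imp ne_of_lt)
        (pvSeen_nodup _ _ _)]
      exact pvMain_mem start end_ hend
    · exact (PySem.List.pairwise_lt_pyRange_one start (end_ + 1)).filter pvP
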